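-- pv_equiv track=rewrite | github.com/kirandhakal25/nltosparql | ontotriple.py | find_target_position
-- ===== SOURCE A (Python) =====
-- def find_target_position(user_triple, target):
--     result = None
--     position = 0
--
--     for idx, term in enumerate(user_triple):
--         if target == term.lower():
--             position = idx
--             result = term
--     return result, position
-- ===== SOURCE B (Python) =====
-- def find_target_position(user_triple, target):
--     for idx in range(len(user_triple) - 1, -1, -1):
--         term = user_triple[idx]
--         if term.lower() == target:
--             return term, idx
--     return None, 0
-- ===== Notes on version B (the rewrite author's own statement) =====
-- stated objective: simpler
-- what changed: Replaces A's full forward scan that keeps overwriting the last match with a right-to-left scan that returns immediately at the first (= last) match.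
import Mathlib
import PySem

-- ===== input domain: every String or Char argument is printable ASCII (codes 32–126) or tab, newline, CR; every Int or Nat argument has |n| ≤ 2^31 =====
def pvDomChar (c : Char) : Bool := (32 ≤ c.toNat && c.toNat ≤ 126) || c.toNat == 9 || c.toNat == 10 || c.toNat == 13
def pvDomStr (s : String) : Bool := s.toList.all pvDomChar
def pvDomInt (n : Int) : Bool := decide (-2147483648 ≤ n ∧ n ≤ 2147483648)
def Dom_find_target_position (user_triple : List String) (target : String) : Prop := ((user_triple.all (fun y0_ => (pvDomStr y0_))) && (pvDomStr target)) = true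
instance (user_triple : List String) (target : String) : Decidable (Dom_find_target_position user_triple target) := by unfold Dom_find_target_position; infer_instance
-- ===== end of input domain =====

-- ===== PORT A =====
-- A: forward scan over enumerate, overwriting (result, position) at every match.
def find_target_position (user_triple : List String) (target : String) : Option String × Int :=
  (PySem.List.enumerate user_triple).foldl
    (fun st p => if target == PySem.Str.lower p.2 then (some p.2, p.1) else st)
    (none, 0)

-- ===== PORT B =====
-- B (simpler): scan from the right by index, return at the first (= last) match.
def ftpGo (user_triple : List String) (target : String) : Nat → Option String × Int
  | 0 => (none, 0)
  | k + 1 =>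
    let term := user_triple.getD k ""
    if PySem.Str.lower term == target then (some term, (k : Int))
    else ftpGo user_triple target k

def find_target_position_alt (user_triple : List String) (target : String) : Option String × Int :=
  ftpGo user_triple target user_triple.length

-- ===== PRECONDITION & SPEC =====
def Spec_find_target_position (user_triple : List String) (target : String) (out : Option String × Int) : Prop := out = find_target_position_alt user_triple target
instance (user_triple : List String) (target : String) (out : Option String × Int) : Decidable (Spec_find_target_position user_triple target out) := by unfold Spec_find_target_position; infer_instance

-- ===== CLAIM (what is proved, stated in full; the proofs are below) =====
def Claim_equal_find_target_position : Prop := ∀ (user_triple : List String) (target : String), Dom_find_target_position user_triple target → Spec_find_target_position user_triple target (find_target_position user_triple target)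

-- ===== LEMMAS AND PROOFS =====

theorem ftpGo_append (us : List String) (x t : String) (n : Nat) (h : n ≤ us.length) :
    ftpGo (us ++ [x]) t n = ftpGo us t n := by
  induction n with
  | zero => rfl
  | succ k ih =>
    have hk : k < us.length := h
    simp only [ftpGo, List.getD, List.getElem?_append_left hk, ih (Nat.le_of_lt hk)]

theorem ftpGo_no_match (us : List String) (t : String)
    (h : us.any (fun s => t == PySem.Str.lower s) = false) (n : Nat) (hn : n ≤ us.length) :
    ftpGo us t n = (none, 0) := by
  induction n with
  | zero => rfl
  | succ k ih =>
    have hk : k < us.length := hn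
    have hmem : us.getD k "" ∈ us := by
      rw [List.getD_eq_getElem us _ hk]; exact List.getElem_mem hk
    have h1 : t ≠ PySem.Str.lower (us.getD k "") := by
      have := List.any_eq_false.mp h _ hmem
      simpa using this
    have hne : PySem.Str.lower (us.getD k "") ≠ t := Ne.symm h1
    simp only [List.getD] at hne
    simp [ftpGo, hne, ih (Nat.le_of_lt hk)]

theorem ftp_foldl_eq (t : String) (us : List String) (st : Option String × Int) :
    (PySem.List.enumerate us).foldl
      (fun st p => if t == PySem.Str.lower p.2 then (some p.2, p.1) else st) st
    = (if us.any (fun s => t == PySem.Str.lower s) then ftpGo us t us.length else st) := by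
  induction us using List.reverseRecOn generalizing st with
  | nil => simp
  | append_singleton us x ih =>
    rw [PySem.List.enumerate_append, List.foldl_append, ih]
    have hget : (us ++ [x]).getD us.length "" = x := by
      simp [List.getD]
    have hlen : (us ++ [x]).length = us.length + 1 := by simp
    by_cases hx : t = PySem.Str.lower x
    · have hx2 : PySem.Str.lower x = t := hx.symm
      simp [PySem.List.enumerate_cons, PySem.List.enumerate_nil, hlen, ftpGo, hx2]
    · have hne : PySem.Str.lower x ≠ t := Ne.symm hx
      rw [hlen]
      simp [PySem.List.enumerate_cons, PySem.List.enumerate_nil, ftpGo, hne, hx,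
        ftpGo_append us x t us.length (le_refl _)]

-- ===== VERDICT (by name: the statement is the Claim_ definition above) =====
theorem find_target_position_spec : Claim_equal_find_target_position := by
  intro us t _
  unfold Spec_find_target_position find_target_position find_target_position_alt
  rw [ftp_foldl_eq]
  by_cases h : us.any (fun s => t == PySem.Str.lower s) = true
  · simp [h]
  · simp only [h]
    rw [ftpGo_no_match us t (by simpa using h) us.length (le_refl _)]
    simp
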